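-- pv_equiv track=rewrite | github.com/CodelineAtyab/OrbitXO | examples/from_aya/Ai_final/converter.py | convert_measurements
-- ===== SOURCE A (Python) =====
-- def char_to_value(ch: str) -> int:
--     if ch == "_":
--         return 0
--     return ord(ch) - ord("a") + 1
--
-- def read_element(s, i):
--     if s[i] == "z":
--         total = 0
--         while i < len(s) and s[i] == "z":
--             total += 26
--             i += 1
--         if i < len(s):
--             total += char_to_value(s[i])
--             i += 1
--         return total, i
--     else:
--         return char_to_value(s[i]), i + 1
--
-- def convert_measurements(input_str: str):
--     results = []
--     i = 0
--     n = len(input_str)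
--
--     while i < n:
--         count, i = read_element(input_str, i)
--
--         if count == 0:
--             results.append(0)
--             continue
--
--         total = 0
--         for _ in range(count):
--             if i >= n:
--                 break
--             val, i = read_element(input_str, i)
--             total += val
--
--         results.append(total)
--
--     return results
-- ===== SOURCE B (Python) =====
-- def convert_measurements(input_str: str):
--     # Pass 1: lex the whole string into a flat list of element values.
--     tokens = []
--     i = 0
--     n = len(input_str)
--     while i < n:
--         v = 0
--         while i < n and input_str[i] == "z":
--             v += 26
--             i += 1
--         if i < n:
--             ch = input_str[i]
--             v += 0 if ch == "_" else ord(ch) - ord("a") + 1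
--             i += 1
--         tokens.append(v)
--     # Pass 2: group the tokens: a count followed by that many values (clamped).
--     results = []
--     j = 0
--     m = len(tokens)
--     while j < m:
--         c = max(tokens[j], 0)
--         results.append(sum(tokens[j + 1 : j + 1 + c]))
--         j += 1 + c
--     return results
-- ===== Notes on version B (the rewrite author's own statement) =====
-- stated objective: alternative
-- what changed: A interleaves lexing and grouping in one stateful walk (re-reading elements inside the grouping loop via read_element); B first lexes the whole string into a flat token list and then groups that list in a second pass with one slice-and-sum per group, folding A's count==0 and negative-count branches into a single clamped slice.
import Mathlib
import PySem

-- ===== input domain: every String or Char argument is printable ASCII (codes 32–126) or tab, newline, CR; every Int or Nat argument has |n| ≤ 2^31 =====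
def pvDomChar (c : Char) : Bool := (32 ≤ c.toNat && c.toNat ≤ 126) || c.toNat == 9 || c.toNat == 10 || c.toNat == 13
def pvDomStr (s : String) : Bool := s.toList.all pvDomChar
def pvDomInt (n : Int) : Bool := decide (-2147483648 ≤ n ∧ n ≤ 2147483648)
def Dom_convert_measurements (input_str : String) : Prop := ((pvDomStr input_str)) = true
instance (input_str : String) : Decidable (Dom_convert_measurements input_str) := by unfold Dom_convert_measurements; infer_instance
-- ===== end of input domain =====

-- B restructures A: one lexing pass building a flat token list, then a grouping pass over it
-- (same result, same cost; 'alternative' decomposition).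

-- ===== PORT A =====
-- char_to_value
def charToValue (ch : Char) : Int := if ch = '_' then 0 else (ch.toNat : Int) - 97 + 1

-- the 'while i < len(s) and s[i] == "z"' loop of read_element, accumulating total
def zRun (s : List Char) (i : Nat) (total : Int) : Int × Nat :=
  if h : i < s.length ∧ s.getD i ' ' = 'z' then zRun s (i + 1) (total + 26) else (total, i)
termination_by s.length - i
decreasing_by exact Nat.sub_succ_lt_self _ _ h.1

theorem zRun_ge (s : List Char) (i : Nat) (t : Int) : i ≤ (zRun s i t).2 := by
  unfold zRun
  split
  · exact le_trans (Nat.le_succ i) (zRun_ge s (i + 1) (t + 26))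
  · simp
termination_by s.length - i
decreasing_by omega

-- read_element (only called with i < len(s); s[i] read via getD, in range at every use)
def readElement (s : List Char) (i : Nat) : Int × Nat :=
  if s.getD i ' ' = 'z' then
    if (zRun s i 0).2 < s.length then
      ((zRun s i 0).1 + charToValue (s.getD (zRun s i 0).2 ' '), (zRun s i 0).2 + 1)
    else zRun s i 0
  else (charToValue (s.getD i ' '), i + 1)

theorem readElement_gt (s : List Char) (i : Nat) (h : i < s.length) :
    i < (readElement s i).2 := by
  unfold readElement
  split
  · rename_i hz
    have h1 : i + 1 ≤ (zRun s (i + 1) (0 + 26)).2 := zRun_ge s (i + 1) (0 + 26)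
    have h2 : zRun s i 0 = zRun s (i + 1) (0 + 26) := by
      rw [zRun, dif_pos ⟨h, hz⟩]
    have h3 : i + 1 ≤ (zRun s i 0).2 := by rw [h2]; exact h1
    split <;> omega
  · simp

-- the 'for _ in range(count)' loop with its break
def innerLoop (s : List Char) (k : Nat) (i : Nat) (total : Int) : Int × Nat :=
  match k with
  | 0 => (total, i)
  | Nat.succ k' =>
    if s.length ≤ i then (total, i)
    else innerLoop s k' (readElement s i).2 (total + (readElement s i).1)

theorem innerLoop_ge (s : List Char) (k i : Nat) (t : Int) : i ≤ (innerLoop s k i t).2 := by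
  induction k generalizing i t with
  | zero => simp [innerLoop]
  | succ k ih =>
    unfold innerLoop
    split
    · simp
    · rename_i h
      exact le_trans (le_of_lt (readElement_gt s i (by omega))) (ih _ _)

-- the outer while loop of convert_measurements
def outerA (s : List Char) (i : Nat) (acc : List Int) : List Int :=
  if h : i < s.length then
    if (readElement s i).1 = 0 then outerA s (readElement s i).2 (acc ++ [0])
    else
      outerA s (innerLoop s (readElement s i).1.toNat (readElement s i).2 0).2
        (acc ++ [(innerLoop s (readElement s i).1.toNat (readElement s i).2 0).1])
  else acc
termination_by s.length - i
decreasing_by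
  · exact Nat.sub_lt_sub_left h (readElement_gt s i h)
  · exact Nat.sub_lt_sub_left h
      (Nat.lt_of_lt_of_le (readElement_gt s i h) (innerLoop_ge s (readElement s i).1.toNat (readElement s i).2 0))

def convert_measurements (input_str : String) : List Int :=
  outerA input_str.toList 0 []

-- ===== PORT B =====
-- pass 1's inner 'while i < n and input_str[i] == "z"' loop
def zCount (s : List Char) (i : Nat) (v : Int) : Int × Nat :=
  if h : i < s.length ∧ s.getD i ' ' = 'z' then zCount s (i + 1) (v + 26) else (v, i)
termination_by s.length - i
decreasing_by exact Nat.sub_succ_lt_self _ _ h.1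

theorem zCount_ge (s : List Char) (i : Nat) (v : Int) : i ≤ (zCount s i v).2 := by
  unfold zCount
  split
  · exact le_trans (Nat.le_succ i) (zCount_ge s (i + 1) (v + 26))
  · simp
termination_by s.length - i
decreasing_by omega

-- pass 1: lex the whole string into the token list
def lex (s : List Char) (i : Nat) (acc : List Int) : List Int :=
  if h : i < s.length then
    if h2 : (zCount s i 0).2 < s.length then
      lex s ((zCount s i 0).2 + 1)
        (acc ++ [(zCount s i 0).1 +
          (if s.getD (zCount s i 0).2 ' ' = '_' then 0
           else ((s.getD (zCount s i 0).2 ' ').toNat : Int) - 97 + 1)])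
    else acc ++ [(zCount s i 0).1]
  else acc
termination_by s.length - i
decreasing_by exact Nat.sub_lt_sub_left h (Nat.lt_succ_of_le (zCount_ge s i 0))

-- pass 2: group the token list: count at index j, then sum of the next max(count,0) tokens
def group (ts : List Int) (j : Nat) (acc : List Int) : List Int :=
  if h : j < ts.length then
    group ts (j + 1 + (max (ts.getD j 0) 0).toNat)
      (acc ++ [(PySem.List.slice ts (some ((j : Int) + 1))
                 (some ((j : Int) + 1 + max (ts.getD j 0) 0))).sum])
  else acc
termination_by ts.length - j
decreasing_by exact Nat.sub_lt_sub_left h (Nat.lt_of_lt_of_le (Nat.lt_succ_self j) (Nat.le_add_right (j + 1) _))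

def convert_measurements_alt (input_str : String) : List Int :=
  group (lex input_str.toList 0 []) 0 []

-- ===== PRECONDITION & SPEC =====
def Spec_convert_measurements (input_str : String) (out : List Int) : Prop := out = convert_measurements_alt input_str
instance (input_str : String) (out : List Int) : Decidable (Spec_convert_measurements input_str out) := by unfold Spec_convert_measurements; infer_instance

-- ===== CLAIM (what is proved, stated in full; the proofs are below) =====
def Claim_equal_convert_measurements : Prop := ∀ (input_str : String), Dom_convert_measurements input_str → Spec_convert_measurements input_str (convert_measurements input_str)

-- ===== LEMMAS AND PROOFS =====

-- the stream of element values read from position i (reference form of A's lexing)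
def toks (s : List Char) (i : Nat) : List Int :=
  if h : i < s.length then (readElement s i).1 :: toks s (readElement s i).2 else []
termination_by s.length - i
decreasing_by exact Nat.sub_lt_sub_left h (readElement_gt s i h)

-- reference form of B's grouping pass, structural on the token list
def gref : List Int → List Int
  | [] => []
  | c :: rest =>
    (rest.take (max c 0).toNat).sum :: gref (rest.drop (max c 0).toNat)
termination_by l => l.length
decreasing_by rw [List.length_drop, List.length_cons]; exact Nat.lt_succ_of_le (Nat.sub_le _ _)

theorem gref_nil : gref [] = [] := by simp [gref]

theorem gref_cons (c : Int) (rest : List Int) :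
    gref (c :: rest) = (rest.take (max c 0).toNat).sum :: gref (rest.drop (max c 0).toNat) := by
  rw [gref.eq_def]

theorem zCount_eq_zRun (s : List Char) (i : Nat) (v : Int) : zCount s i v = zRun s i v := by
  unfold zCount zRun
  split
  · exact zCount_eq_zRun s (i + 1) (v + 26)
  · rfl
termination_by s.length - i
decreasing_by omega

theorem toks_eq_nil (s : List Char) (i : Nat) (h : ¬ i < s.length) : toks s i = [] := by
  unfold toks; simp [h]

theorem lex_eq (s : List Char) (i : Nat) (acc : List Int) :
    lex s i acc = acc ++ toks s i := by
  rw [lex]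
  by_cases h : i < s.length
  · rw [toks]
    simp only [h, dite_true]
    by_cases hz : s.getD i ' ' = 'z'
    · have hre : readElement s i =
          (if (zRun s i 0).2 < s.length then
            ((zRun s i 0).1 + charToValue (s.getD (zRun s i 0).2 ' '), (zRun s i 0).2 + 1)
          else zRun s i 0) := by
        rw [readElement, if_pos hz]
      rw [zCount_eq_zRun]
      by_cases h2 : (zRun s i 0).2 < s.length
      · simp only [h2, dite_true]
        rw [lex_eq s ((zRun s i 0).2 + 1)]
        rw [hre, if_pos h2]
        simp [charToValue]
      · simp only [h2, dite_false]
        rw [hre, if_neg h2]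
        rw [toks_eq_nil s (zRun s i 0).2 h2]
    · have hzc : zCount s i 0 = (0, i) := by
        have hn : ¬ (i < s.length ∧ s.getD i ' ' = 'z') := by
          intro hc; exact hz hc.2
        rw [zCount, dif_neg hn]
      have hre : readElement s i = (charToValue (s.getD i ' '), i + 1) := by
        rw [readElement, if_neg hz]
      rw [hzc]
      simp only [h, dite_true]
      rw [lex_eq s (i + 1)]
      rw [hre]
      simp [charToValue]
  · rw [toks_eq_nil s i h]
    simp [h]
termination_by s.length - i
decreasing_by
  · have := zRun_ge s i 0; omega
  · omega

theorem innerLoop_spec (s : List Char) (k i : Nat) (t : Int) :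
    (innerLoop s k i t).1 = t + ((toks s i).take k).sum ∧
      toks s (innerLoop s k i t).2 = (toks s i).drop k := by
  induction k generalizing i t with
  | zero => simp [innerLoop]
  | succ k ih =>
    unfold innerLoop
    by_cases h : s.length ≤ i
    · have ht : toks s i = [] := toks_eq_nil s i (by omega)
      simp [h, ht]
    · simp only [h, ite_false]
      have htk : toks s i = (readElement s i).1 :: toks s (readElement s i).2 := by
        rw [toks]; simp [show i < s.length by omega]
      obtain ⟨ih1, ih2⟩ := ih (readElement s i).2 (t + (readElement s i).1)
      constructor
      · rw [ih1, htk]; simp [List.sum_cons]; ring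
      · rw [ih2, htk]; simp

theorem group_eq (ts : List Int) (j : Nat) (acc : List Int) :
    group ts j acc = acc ++ gref (ts.drop j) := by
  rw [group]
  by_cases h : j < ts.length
  · simp only [h, dite_true]
    have hd : ts.drop j = ts.getD j 0 :: ts.drop (j + 1) := by
      rw [List.getD_eq_getElem ts 0 h]
      exact List.drop_eq_getElem_cons h
    have hslice : PySem.List.slice ts (some ((j : Int) + 1))
        (some ((j : Int) + 1 + max (ts.getD j 0) 0)) =
        (ts.drop (j + 1)).take (max (ts.getD j 0) 0).toNat := by
      have e1 : (j : Int) + 1 = ((j + 1 : Nat) : Int) := by push_cast; ring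
      have e2 : (j : Int) + 1 + max (ts.getD j 0) 0 =
          ((j + 1 : Nat) : Int) + (((max (ts.getD j 0) 0).toNat : Nat) : Int) := by
        push_cast; omega
      rw [e2, e1, PySem.List.slice_natCast_add]
    have hdd : ts.drop (j + 1 + (max (ts.getD j 0) 0).toNat) =
        (ts.drop (j + 1)).drop (max (ts.getD j 0) 0).toNat := by
      rw [List.drop_drop]
    rw [hslice, group_eq ts (j + 1 + (max (ts.getD j 0) 0).toNat), hd, gref_cons, hdd]
    simp
  · simp only [h, dite_false]
    rw [List.drop_eq_nil_of_le (by omega), gref_nil]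
    simp
termination_by ts.length - j
decreasing_by omega

theorem outer_eq (s : List Char) (i : Nat) (acc : List Int) :
    outerA s i acc = acc ++ gref (toks s i) := by
  rw [outerA]
  by_cases h : i < s.length
  · simp only [h, dite_true]
    have htk : toks s i = (readElement s i).1 :: toks s (readElement s i).2 := by
      rw [toks]; simp [h]
    have hmax : (max (readElement s i).1 0).toNat = (readElement s i).1.toNat := by omega
    rw [htk, gref_cons, hmax]
    obtain ⟨h1, h2⟩ := innerLoop_spec s (readElement s i).1.toNat (readElement s i).2 0
    by_cases hc : (readElement s i).1 = 0
    · simp only [hc, ite_true]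
      rw [outer_eq s (readElement s i).2]
      simp
    · simp only [hc, ite_false]
      rw [outer_eq s (innerLoop s (readElement s i).1.toNat (readElement s i).2 0).2]
      rw [h1, h2]
      simp
  · simp only [h, dite_false]
    rw [toks_eq_nil s i h, gref_nil]
    simp
termination_by s.length - i
decreasing_by
  · have := readElement_gt s i h; omega
  · have h1 := readElement_gt s i h
    have h2 := innerLoop_ge s (readElement s i).1.toNat (readElement s i).2 0
    omega

-- ===== VERDICT (by name: the statement is the Claim_ definition above) =====
theorem convert_measurements_spec : Claim_equal_convert_measurements := by
  intro s _
  unfold Spec_convert_measurements convert_measurements convert_measurements_alt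
  rw [outer_eq, lex_eq, group_eq]
  simp
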